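-- pv_equiv track=rewrite | github.com/windowsyl/aoc | 2021/day19.py | rotateflip
-- ===== SOURCE A (Python) =====
-- def rotateflip(data, axis, up):
--     data = [i.copy() for i in data]
--     match axis:
--         case 0: pass
--         case 1: #face -x
--             data = [[-x, -y, z] for x, y, z in data]
--         case 2: #face y
--             data = [[y, -x, z] for x, y, z in data]
--         case 3: #face -y
--             data = [[-y, x, z] for x, y, z in data]
--         case 4: #face z
--             data = [[z, y, -x] for x, y, z in data]
--         case 5: #face -z
--             data = [[-z, y, x] for x, y, z in data]
--     for i in range(up):
--         data = [[x, z, -y] for x, y, z in data]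
--     return data
-- ===== SOURCE B (Python) =====
-- AXIS = {1: ((0, 1, 2), (-1, -1, 1)),
--         2: ((1, 0, 2), (1, -1, 1)),
--         3: ((1, 0, 2), (-1, 1, 1)),
--         4: ((2, 1, 0), (1, 1, -1)),
--         5: ((2, 1, 0), (-1, 1, 1))}
-- UP = [((0, 1, 2), (1, 1, 1)),
--       ((0, 2, 1), (1, 1, -1)),
--       ((0, 1, 2), (1, -1, -1)),
--       ((0, 2, 1), (1, -1, 1))]
--
-- def rotateflip(data, axis, up):
--     pa, sa = AXIS.get(axis, ((0, 1, 2), (1, 1, 1)))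
--     pr, sr = UP[up % 4 if up > 0 else 0]
--     p = tuple(pa[j] for j in pr)
--     s = tuple(sr[i] * sa[pr[i]] for i in range(3))
--     if p == (0, 1, 2) and s == (1, 1, 1):
--         return [row.copy() for row in data]
--     return [[s[0] * row[p[0]], s[1] * row[p[1]], s[2] * row[p[2]]] for row in data]
-- ===== Notes on version B (the rewrite author's own statement) =====
-- stated objective: faster
-- what changed: A applies the up-rotation (x,y,z)->(x,z,-y) in a loop up times after the axis transform; B composes the axis transform with the (up%4)-th power of the up-rotation into one signed index permutation and rewrites each point exactly once (or just copies rows when the composed transform is the identity).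
import Mathlib
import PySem

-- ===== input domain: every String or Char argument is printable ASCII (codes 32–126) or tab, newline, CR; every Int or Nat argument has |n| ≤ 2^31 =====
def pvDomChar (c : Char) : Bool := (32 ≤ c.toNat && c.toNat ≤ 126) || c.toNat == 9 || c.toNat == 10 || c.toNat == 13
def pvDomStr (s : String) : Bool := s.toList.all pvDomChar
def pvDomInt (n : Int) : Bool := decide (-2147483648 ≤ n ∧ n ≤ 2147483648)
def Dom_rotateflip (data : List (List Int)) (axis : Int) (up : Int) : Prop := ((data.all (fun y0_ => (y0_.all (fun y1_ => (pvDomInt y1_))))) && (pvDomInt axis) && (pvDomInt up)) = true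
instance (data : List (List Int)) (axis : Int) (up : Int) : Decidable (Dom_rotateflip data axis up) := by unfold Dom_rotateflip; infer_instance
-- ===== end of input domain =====

-- B replaces A's repeated `for i in range(up)` rotation by a closed-form signed
-- permutation: the axis transform and up%4-th power of the up-rotation are
-- composed once and applied in a single comprehension (objective: faster, one
-- pass independent of up).

-- ===== PORT A =====
-- the [x,z,-y] rotation of one row; the `_ => []` branch is unreachable under Pre_
-- (in Python the unpacking raises there)
def pvRotUp (r : List Int) : List Int :=
  match r with | [x, y, z] => [x, z, -y] | _ => []

def rotateflip (data : List (List Int)) (axis : Int) (up : Int) : List (List Int) :=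
  let d0 := data.map (fun i => i)              -- i.copy()
  let d1 :=
    if axis = 1 then d0.map (fun r => match r with | [x, y, z] => [-x, -y, z] | _ => [])
    else if axis = 2 then d0.map (fun r => match r with | [x, y, z] => [y, -x, z] | _ => [])
    else if axis = 3 then d0.map (fun r => match r with | [x, y, z] => [-y, x, z] | _ => [])
    else if axis = 4 then d0.map (fun r => match r with | [x, y, z] => [z, y, -x] | _ => [])
    else if axis = 5 then d0.map (fun r => match r with | [x, y, z] => [-z, y, x] | _ => [])
    else d0
  (PySem.List.pyRange 0 up 1).foldl (fun d _ => d.map pvRotUp) d1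

-- ===== PORT B =====
-- tuple indexing t[i] for the 3-tuples of Source B
def pvIx3 {α : Type} (t : α × α × α) (i : Nat) : α :=
  match i with | 0 => t.1 | 1 => t.2.1 | _ => t.2.2

-- AXIS.get(axis, ((0,1,2),(1,1,1)))
def pvAxisGet (axis : Int) : (Nat × Nat × Nat) × (Int × Int × Int) :=
  if axis = 1 then ((0, 1, 2), (-1, -1, 1))
  else if axis = 2 then ((1, 0, 2), (1, -1, 1))
  else if axis = 3 then ((1, 0, 2), (-1, 1, 1))
  else if axis = 4 then ((2, 1, 0), (1, 1, -1))
  else if axis = 5 then ((2, 1, 0), (-1, 1, 1))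
  else ((0, 1, 2), (1, 1, 1))

-- UP[n] for n = 0..3 (n is up % 4, always < 4)
def pvUpTable (n : Nat) : (Nat × Nat × Nat) × (Int × Int × Int) :=
  match n with
  | 0 => ((0, 1, 2), (1, 1, 1))
  | 1 => ((0, 2, 1), (1, 1, -1))
  | 2 => ((0, 1, 2), (1, -1, -1))
  | _ => ((0, 2, 1), (1, -1, 1))

def rotateflip_alt (data : List (List Int)) (axis : Int) (up : Int) : List (List Int) :=
  let pasa := pvAxisGet axis
  let pa := pasa.1
  let sa := pasa.2
  let prsr := pvUpTable (if 0 < up then (PySem.Int.mod up 4).toNat else 0)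
  let pr := prsr.1
  let sr := prsr.2
  let p : Nat × Nat × Nat := (pvIx3 pa pr.1, pvIx3 pa pr.2.1, pvIx3 pa pr.2.2)
  let s : Int × Int × Int :=
    (sr.1 * pvIx3 sa pr.1, sr.2.1 * pvIx3 sa pr.2.1, sr.2.2 * pvIx3 sa pr.2.2)
  if (p, s) = (((0 : Nat), 1, 2), ((1 : Int), 1, 1)) then
    data.map (fun row => row)                  -- row.copy()
  else
    data.map (fun row => [s.1 * row.getD p.1 0, s.2.1 * row.getD p.2.1 0, s.2.2 * row.getD p.2.2 0])

-- ===== PRECONDITION & SPEC =====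
-- Pre_ excludes exactly the inputs where Python A raises: whenever the axis case
-- or the up-loop actually unpacks rows (axis in 1..5 or up > 0), every row must
-- have exactly 3 elements; otherwise A never touches the row contents.
def Pre_rotateflip (data : List (List Int)) (axis : Int) (up : Int) : Prop :=
  ((1 ≤ axis ∧ axis ≤ 5) ∨ 0 < up) → ∀ r ∈ data, r.length = 3
instance (data : List (List Int)) (axis : Int) (up : Int) : Decidable (Pre_rotateflip data axis up) := by unfold Pre_rotateflip; infer_instance

def pvWitness_rotateflip : List (List Int) × Int × Int := ([[1, 2, 3], [-4, 5, 6]], 2, 7)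

def Spec_rotateflip (data : List (List Int)) (axis : Int) (up : Int) (out : List (List Int)) : Prop := out = rotateflip_alt data axis up
instance (data : List (List Int)) (axis : Int) (up : Int) (out : List (List Int)) : Decidable (Spec_rotateflip data axis up out) := by unfold Spec_rotateflip; infer_instance

-- ===== CLAIM (what is proved, stated in full; the proofs are below) =====
def Claim_equal_rotateflip : Prop := ∀ (data : List (List Int)) (axis : Int) (up : Int), Dom_rotateflip data axis up → Pre_rotateflip data axis up → Spec_rotateflip data axis up (rotateflip data axis up)

-- ===== LEMMAS AND PROOFS =====

theorem foldl_const_iterate {α β : Type} (l : List α) (g : β → β) (init : β) :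
    l.foldl (fun d _ => g d) init = g^[l.length] init := by
  induction l generalizing init with
  | nil => rfl
  | cons a t ih => simp [List.foldl, ih, Function.iterate_succ_apply]

theorem map_iterate {α : Type} (f : α → α) (n : Nat) (l : List α) :
    (fun d => d.map f)^[n] l = l.map f^[n] := by
  induction n generalizing l with
  | zero => simp
  | succ k ih => simp [Function.iterate_succ_apply, ih, Function.comp_def]

theorem rotUp_four (x y z : Int) : pvRotUp^[4] [x, y, z] = [x, y, z] := by
  simp [pvRotUp, Function.iterate_succ_apply]

theorem rotUp_mod4 (n : Nat) (x y z : Int) :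
    pvRotUp^[n] [x, y, z] = pvRotUp^[n % 4] [x, y, z] := by
  have key : ∀ k m x y z, pvRotUp^[4 * k + m] [(x : Int), y, z] = pvRotUp^[m] [x, y, z] := by
    intro k
    induction k with
    | zero => intro m x y z; simp
    | succ j ih =>
      intro m x y z
      have h : 4 * (j + 1) + m = 4 * j + m + 4 := by omega
      rw [h, Function.iterate_add_apply, rotUp_four, ih]
  have : n = 4 * (n / 4) + n % 4 := by omega
  calc pvRotUp^[n] [x, y, z] = pvRotUp^[4 * (n / 4) + n % 4] [x, y, z] := by rw [← this]
    _ = pvRotUp^[n % 4] [x, y, z] := key _ _ _ _ _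

theorem len3_map (f : List Int → List Int) (hf : ∀ x y z : Int, (f [x, y, z]).length = 3)
    (l : List (List Int)) (h : ∀ r ∈ l, r.length = 3) :
    ∀ r ∈ l.map f, r.length = 3 := by
  intro r hr
  obtain ⟨q, hq, rfl⟩ := List.mem_map.mp hr
  obtain ⟨x, y, z, rfl⟩ := List.length_eq_three.mp (h q hq)
  exact hf x y z

theorem map_rot_mod (n : Nat) (l : List (List Int)) (h : ∀ r ∈ l, r.length = 3) :
    l.map pvRotUp^[n] = l.map pvRotUp^[n % 4] :=
  List.map_congr_left fun r hr => by
    obtain ⟨x, y, z, rfl⟩ := List.length_eq_three.mp (h r hr)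
    exact rotUp_mod4 n x y z

-- ===== VERDICT (by name: the statement is the Claim_ definition above) =====
theorem rotateflip_spec : Claim_equal_rotateflip := by
  intro data axis up _ hpre
  unfold Spec_rotateflip rotateflip rotateflip_alt
  rw [foldl_const_iterate, PySem.List.length_pyRange_one, map_iterate]
  simp only [Int.sub_zero, List.map_id']
  by_cases hup : 0 < up
  · have hmod : (PySem.Int.mod up 4).toNat = up.toNat % 4 := by
      rw [PySem.Int.mod_eq_emod_of_pos (by norm_num)]; omega
    have hpre' := hpre (Or.inr hup)
    have hm4 : up.toNat % 4 = 0 ∨ up.toNat % 4 = 1 ∨ up.toNat % 4 = 2 ∨ up.toNat % 4 = 3 := by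
      omega
    simp only [if_pos hup, hmod]
    split_ifs with ha1 ha2 ha3 ha4 ha5 <;>
      rw [map_rot_mod _ _ (by first
            | exact hpre'
            | exact len3_map _ (by intro x y z; rfl) _ hpre')] <;>
      rcases hm4 with h4 | h4 | h4 | h4 <;>
      rw [h4] <;>
      (try simp only [pvAxisGet, pvUpTable, pvIx3, List.map_map, *]) <;>
      (first
        | rfl
        | (exfalso; simp_all [pvAxisGet, pvUpTable, pvIx3]; done)
        | (refine List.map_congr_left fun r hr => ?_
           obtain ⟨x, y, z, rfl⟩ := List.length_eq_three.mp (hpre' r hr)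
           simp [pvRotUp]; done)
        | (conv_rhs => rw [← List.map_id data]
           refine List.map_congr_left fun r hr => ?_
           obtain ⟨x, y, z, rfl⟩ := List.length_eq_three.mp (hpre' r hr)
           simp))
  · have h0 : up.toNat = 0 := by omega
    rw [h0, if_neg hup]
    simp only [Function.iterate_zero]
    split_ifs with ha1 ha2 ha3 ha4 ha5 <;>
      (try simp only [pvAxisGet, pvUpTable, pvIx3, List.map_map, *]) <;>
      (first
        | rfl
        | (exact List.map_id data)
        | (exfalso; simp_all [pvAxisGet, pvUpTable, pvIx3]; done)
        | (refine List.map_congr_left fun r hr => ?_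
           obtain ⟨x, y, z, rfl⟩ :=
             List.length_eq_three.mp (hpre (Or.inl (by omega)) r hr)
           simp))
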